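-- pv_equiv track=rewrite | github.com/jatinarora2702/Competitive-Coding | codeforces/2126B.py | solve
-- ===== SOURCE A (Python) =====
-- def solve(a: list[int], n: int, k: int) -> int:
--     if n < k:
--         return 0
--     cnt, start = 0, 0
--     for i in range(n):
--         if a[i] == 1:
--             start = i + 1
--             continue
--         if i - start + 1 == k:
--             cnt += 1
--             start = i + 2
--     return cnt
-- ===== SOURCE B (Python) =====
-- def solve(a: list[int], n: int, k: int) -> int:
--     # Run-length decomposition: each maximal run of non-1 values of length m
--     # among the first n elements contributes (m+1)//(k+1) blocks (period k+1
--     # because the greedy placement skips one cell after each counted block).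
--     if k <= 0 or n < k:
--         return 0
--     total = 0
--     run = 0
--     for x in a[:n]:
--         if x == 1:
--             total += (run + 1) // (k + 1)
--             run = 0
--         else:
--             run += 1
--     total += (run + 1) // (k + 1)
--     return total
-- ===== Notes on version B (the rewrite author's own statement) =====
-- stated objective: alternative
-- what changed: Replaces the greedy start-pointer index scan with a run-length scan over a[:n] plus a closed-form (m+1)//(k+1) count per maximal run of non-1 values.
import Mathlib
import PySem

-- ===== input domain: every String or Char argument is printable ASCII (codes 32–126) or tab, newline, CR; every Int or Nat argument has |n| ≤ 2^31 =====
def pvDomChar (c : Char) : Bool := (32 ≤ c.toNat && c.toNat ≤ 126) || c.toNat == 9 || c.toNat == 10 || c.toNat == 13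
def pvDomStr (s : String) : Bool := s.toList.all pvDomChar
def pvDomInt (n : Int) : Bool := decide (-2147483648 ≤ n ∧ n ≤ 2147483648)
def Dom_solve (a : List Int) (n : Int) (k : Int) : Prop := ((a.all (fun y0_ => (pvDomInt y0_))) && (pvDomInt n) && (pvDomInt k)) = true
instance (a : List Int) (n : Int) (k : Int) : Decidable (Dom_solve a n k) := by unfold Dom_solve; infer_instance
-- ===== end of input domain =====

-- B replaces A's greedy start-pointer index scan with a run-length scan plus a
-- closed-form (m+1)//(k+1) count per maximal run of non-1 values (objective: alternative).

-- ===== PORT A =====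
def solve (a : List Int) (n : Int) (k : Int) : Int :=
  if n < k then 0
  else
    ((PySem.List.pyRange 0 n 1).foldl
      (fun (s : Int × Int) i =>
        if PySem.List.pyGetD a i 0 == 1 then (s.1, i + 1)
        else if i - s.2 + 1 == k then (s.1 + 1, i + 2)
        else s) ((0 : Int), (0 : Int))).1

-- ===== PORT B =====
def solve_alt (a : List Int) (n : Int) (k : Int) : Int :=
  if k ≤ 0 || n < k then 0
  else
    let s := (PySem.List.slice a none (some n)).foldl
      (fun (s : Int × Int) x =>
        if x == 1 then (s.1 + PySem.Int.floordiv (s.2 + 1) (k + 1), 0)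
        else (s.1, s.2 + 1)) ((0 : Int), (0 : Int))
    s.1 + PySem.Int.floordiv (s.2 + 1) (k + 1)

-- ===== PRECONDITION & SPEC =====
-- Pre_ excludes exactly the inputs where A raises IndexError: n > len(a) together with k ≤ n.
def Pre_solve (a : List Int) (n : Int) (k : Int) : Prop := n ≤ (a.length : Int) ∨ n < k
instance (a : List Int) (n : Int) (k : Int) : Decidable (Pre_solve a n k) := by unfold Pre_solve; infer_instance
def pvWitness_solve : List Int × Int × Int := ([0, 0, 1, 0, 0], 5, 2)

def Spec_solve (a : List Int) (n : Int) (k : Int) (out : Int) : Prop := out = solve_alt a n k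
instance (a : List Int) (n : Int) (k : Int) (out : Int) : Decidable (Spec_solve a n k out) := by unfold Spec_solve; infer_instance

-- ===== CLAIM (what is proved, stated in full; the proofs are below) =====
def Claim_equal_solve : Prop := ∀ (a : List Int) (n : Int) (k : Int), Dom_solve a n k → Pre_solve a n k → Spec_solve a n k (solve a n k)

-- ===== LEMMAS AND PROOFS =====

-- A's loop, restated on the prefix list it actually reads (proof-side helper).
def loopA (k : Int) : List Int → Int → (Int × Int) → (Int × Int)
  | [], _, s => s
  | x :: rest, j, s =>
    if x == 1 then loopA k rest (j + 1) (s.1, j + 1)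
    else if j - s.2 + 1 == k then loopA k rest (j + 1) (s.1 + 1, j + 2)
    else loopA k rest (j + 1) s

lemma bridgeA (a : List Int) (k : Int) :
    ∀ (lst : List Int) (j : Int) (s : Int × Int),
      (∀ (m : Nat), m < lst.length → PySem.List.pyGetD a (j + (m : Int)) 0 = lst.getD m 0) →
      (PySem.List.pyRange j (j + (lst.length : Int)) 1).foldl
        (fun (s : Int × Int) i =>
          if PySem.List.pyGetD a i 0 == 1 then (s.1, i + 1)
          else if i - s.2 + 1 == k then (s.1 + 1, i + 2)
          else s) s = loopA k lst j s := by
  intro lst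
  induction lst with
  | nil => intro j s _; simp [loopA, PySem.List.pyRange_one_eq_nil]
  | cons x rest ih =>
    intro j s h
    have hx : PySem.List.pyGetD a j 0 = x := by
      have := h 0 (by simp)
      simpa using this
    have hcons : PySem.List.pyRange j (j + ((x :: rest).length : Int)) 1
        = j :: PySem.List.pyRange (j + 1) (j + ((x :: rest).length : Int)) 1 := by
      apply PySem.List.pyRange_one_cons
      simp only [List.length_cons]
      push_cast; omega
    have hend : j + ((x :: rest).length : Int) = (j + 1) + (rest.length : Int) := by
      simp only [List.length_cons]; push_cast; ring
    have hrest : ∀ (m : Nat), m < rest.length →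
        PySem.List.pyGetD a ((j + 1) + (m : Int)) 0 = rest.getD m 0 := by
      intro m hm
      have := h (m + 1) (by simpa using Nat.succ_lt_succ hm)
      have harg : j + ((m + 1 : Nat) : Int) = (j + 1) + (m : Int) := by push_cast; ring
      rw [harg, List.getD_cons_succ] at this
      exact this
    rw [hcons, List.foldl_cons, hend]
    simp only [hx, loopA]
    by_cases h1 : x == 1
    · simp only [h1, if_true]
      exact ih _ _ hrest
    · by_cases h2 : j - s.2 + 1 == k
      · simp only [h1, h2, Bool.false_eq_true, if_false, if_true]
        exact ih _ _ hrest
      · simp only [h1, h2, Bool.false_eq_true, if_false]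
        exact ih _ _ hrest

-- With k ≤ 0, A's condition i - start + 1 == k can never fire (start ≤ i always), so cnt stays 0.
lemma loopA_nonpos (k : Int) (hk : k ≤ 0) :
    ∀ (lst : List Int) (j : Int) (s : Int × Int), s.2 ≤ j → (loopA k lst j s).1 = s.1 := by
  intro lst
  induction lst with
  | nil => intro j s _; simp [loopA]
  | cons x rest ih =>
    intro j s hs
    have h2 : j - s.2 + 1 ≠ k := by omega
    by_cases h1 : x == 1
    · simp only [loopA, h1, if_true]
      exact ih (j + 1) (s.1, j + 1) (by simp)
    · simp only [loopA, h1, Bool.false_eq_true, if_false, beq_iff_eq, h2]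
      exact ih (j + 1) s (by omega)

-- The loop invariant tying A's greedy (cnt, start) to B's (total, run):
-- cnt = total + (run+1)//(k+1) and start = j - run + ((run+1)//(k+1))*(k+1).
lemma loopA_eq_runs (k : Int) (hk : 1 ≤ k) :
    ∀ (lst : List Int) (j tot run : Int), 0 ≤ run →
      (loopA k lst j
        (tot + PySem.Int.floordiv (run + 1) (k + 1),
         j - run + PySem.Int.floordiv (run + 1) (k + 1) * (k + 1))).1
      = (lst.foldl
          (fun (s : Int × Int) x =>
            if x == 1 then (s.1 + PySem.Int.floordiv (s.2 + 1) (k + 1), 0)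
            else (s.1, s.2 + 1)) (tot, run)).1
        + PySem.Int.floordiv
            ((lst.foldl
              (fun (s : Int × Int) x =>
                if x == 1 then (s.1 + PySem.Int.floordiv (s.2 + 1) (k + 1), 0)
                else (s.1, s.2 + 1)) (tot, run)).2 + 1) (k + 1) := by
  intro lst
  induction lst with
  | nil => intro j tot run _; simp [loopA]
  | cons x rest ih =>
    intro j tot run hrun
    have hkpos : (0 : Int) < k + 1 := by omega
    have hfd1 : PySem.Int.floordiv ((0 : Int) + 1) (k + 1) = 0 := by
      rw [PySem.Int.floordiv_eq_iff_of_pos hkpos]; omega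
    set c := PySem.Int.floordiv (run + 1) (k + 1) with hc
    set r := PySem.Int.mod (run + 1) (k + 1) with hr
    have hmul : c * (k + 1) + r = run + 1 := PySem.Int.floordiv_mul_add_mod (run + 1) (k + 1)
    have hrlo : 0 ≤ r := PySem.Int.mod_nonneg _ hkpos
    have hrhi : r < k + 1 := PySem.Int.mod_lt _ hkpos
    simp only [loopA, List.foldl_cons]
    by_cases h1 : x == 1
    · simp only [h1, if_true]
      have h := ih (j + 1) (tot + c) 0 le_rfl
      rw [hfd1] at h
      simp only [add_zero, sub_zero, zero_mul] at h
      exact h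
    · simp only [h1, Bool.false_eq_true, if_false]
      have hval : j - (j - run + c * (k + 1)) + 1 = r := by linarith [hmul]
      rw [hval]
      by_cases hrk : r = k
      · rw [hrk] at hmul
        have hfd2 : PySem.Int.floordiv (run + 1 + 1) (k + 1) = c + 1 := by
          rw [PySem.Int.floordiv_eq_iff_of_pos hkpos]
          constructor <;> nlinarith [hmul]
        simp only [hrk, if_pos (beq_self_eq_true k)]
        have h := ih (j + 1) tot (run + 1) (by omega)
        rw [hfd2] at h
        have e1 : tot + (c + 1) = tot + c + 1 := by ring
        have e2 : j + 1 - (run + 1) + (c + 1) * (k + 1) = j + 2 := by nlinarith [hmul]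
        rw [e1, e2] at h
        exact h
      · have hrk' : r ≤ k - 1 := by omega
        have hfd2 : PySem.Int.floordiv (run + 1 + 1) (k + 1) = c := by
          rw [PySem.Int.floordiv_eq_iff_of_pos hkpos]
          constructor <;> nlinarith [hmul]
        have hne : (r == k) = false := by simp [hrk]
        simp only [hne, Bool.false_eq_true, if_false]
        have h := ih (j + 1) tot (run + 1) (by omega)
        rw [hfd2] at h
        have e2 : j + 1 - (run + 1) + c * (k + 1) = j - run + c * (k + 1) := by ring
        rw [e2] at h
        exact h

lemma take_index (a : List Int) (n : Int) (_hn : 0 ≤ n) (_hlen : n ≤ (a.length : Int)) :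
    ∀ (m : Nat), m < (a.take n.toNat).length →
      PySem.List.pyGetD a ((0 : Int) + (m : Int)) 0 = (a.take n.toNat).getD m 0 := by
  intro m hm
  have hmin : (a.take n.toNat).length = min n.toNat a.length := List.length_take
  have hm' : m < a.length := by omega
  have h1 : PySem.List.pyGetD a ((0 : Int) + (m : Int)) 0 = a.getD m 0 := by
    rw [zero_add]; exact PySem.List.pyGetD_natCast a m 0
  rw [h1, List.getD_eq_getElem a 0 hm', List.getD_eq_getElem _ 0 hm, List.getElem_take]

-- ===== VERDICT (by name: the statement is the Claim_ definition above) =====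
theorem solve_spec : Claim_equal_solve := by
  intro a n k _ hpre
  unfold Spec_solve solve solve_alt
  by_cases hnk : n < k
  · rw [if_pos hnk, if_pos (by simp [hnk])]
  · rw [if_neg hnk]
    have hnk' : k ≤ n := by omega
    by_cases hk0 : k ≤ 0
    · rw [if_pos (by simp [hk0])]
      by_cases hn0 : 0 ≤ n
      · have hlen : n ≤ (a.length : Int) := by rcases hpre with h | h; exact h; omega
        rw [show PySem.List.pyRange 0 n 1
              = PySem.List.pyRange 0 (0 + ((a.take n.toNat).length : Int)) 1 by
              congr 1; rw [List.length_take]; push_cast; omega]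
        rw [bridgeA a k (a.take n.toNat) 0 ((0 : Int), (0 : Int))
              (take_index a n hn0 hlen)]
        exact loopA_nonpos k hk0 _ 0 _ (by simp)
      · rw [PySem.List.pyRange_one_eq_nil (by omega)]
        simp
    · have hk1 : 1 ≤ k := by omega
      have hn0 : 0 ≤ n := by omega
      have hlen : n ≤ (a.length : Int) := by rcases hpre with h | h; exact h; omega
      rw [if_neg (by simp only [Bool.or_eq_true, decide_eq_true_eq]; omega)]
      rw [PySem.List.slice_to a hn0]
      rw [show PySem.List.pyRange 0 n 1
            = PySem.List.pyRange 0 (0 + ((a.take n.toNat).length : Int)) 1 by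
            congr 1; rw [List.length_take]; push_cast; omega]
      rw [bridgeA a k (a.take n.toNat) 0 ((0 : Int), (0 : Int))
            (take_index a n hn0 hlen)]
      have hfd1 : PySem.Int.floordiv ((0 : Int) + 1) (k + 1) = 0 := by
        rw [PySem.Int.floordiv_eq_iff_of_pos (by omega)]; omega
      have h := loopA_eq_runs k hk1 (a.take n.toNat) 0 0 0 le_rfl
      rw [hfd1] at h
      simp only [add_zero, sub_zero, zero_mul] at h ⊢
      exact h
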